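-- pv_equiv track=rewrite | github.com/ppisljar/speech_dataset_creator | m6_segment.py | find_silence_for_subsegment_start
-- ===== SOURCE A (Python) =====
-- from typing import List, Tuple, Optional
--
-- Sil = Tuple[int, int, int]  # start_ms, end_ms, dur_ms
--
-- def find_silence_for_subsegment_start(silences: List[Sil], segment_start_ms: int) -> Optional[int]:
--     """
--     Find the appropriate silence boundary for subsegment start.
--     Returns the end of the closest silence that covers or precedes the segment start.
--     """
--     best_silence_end = None
--
--     for s_start, s_end, s_dur in silences:
--         # Case 1: Silence covers the segment start point
--         if s_start <= segment_start_ms <= s_end and s_dur >= 100:  # At least 100ms silence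
--             # Be more conservative: use the segment start itself if it's well within the silence,
--             # otherwise use a point closer to the segment start
--             if segment_start_ms - s_start >= 50:  # At least 50ms into the silence
--                 return segment_start_ms
--             else:
--                 return max(s_start + 25, segment_start_ms - 25)  # Stay close to segment start
--
--         # Case 2: Silence ended before segment start (but close to it)
--         elif s_end <= segment_start_ms and (segment_start_ms - s_end) <= 200:  # Within 200ms
--             if best_silence_end is None or s_end > best_silence_end:
--                 best_silence_end = s_end
--
--     return best_silence_end
-- ===== SOURCE B (Python) =====
-- from typing import List, Tuple, Optional
--
-- Sil = Tuple[int, int, int]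
--
-- def find_silence_for_subsegment_start(silences: List[Sil], segment_start_ms: int) -> Optional[int]:
--     covering = next((s for s in silences
--                      if s[0] <= segment_start_ms <= s[1] and s[2] >= 100), None)
--     if covering is not None:
--         s_start = covering[0]
--         if segment_start_ms - s_start >= 50:
--             return segment_start_ms
--         return max(s_start + 25, segment_start_ms - 25)
--     preceding = [s_end for _, s_end, _ in silences
--                  if s_end <= segment_start_ms and segment_start_ms - s_end <= 200]
--     return max(preceding) if preceding else None
-- ===== Notes on version B (the rewrite author's own statement) =====
-- stated objective: idiomatic
-- what changed: The single interleaved loop with an early return and a running best is split into two separate passes: a first-match search for a covering silence (next/generator), then a list comprehension of qualifying preceding silence ends reduced with max().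
import Mathlib
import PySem

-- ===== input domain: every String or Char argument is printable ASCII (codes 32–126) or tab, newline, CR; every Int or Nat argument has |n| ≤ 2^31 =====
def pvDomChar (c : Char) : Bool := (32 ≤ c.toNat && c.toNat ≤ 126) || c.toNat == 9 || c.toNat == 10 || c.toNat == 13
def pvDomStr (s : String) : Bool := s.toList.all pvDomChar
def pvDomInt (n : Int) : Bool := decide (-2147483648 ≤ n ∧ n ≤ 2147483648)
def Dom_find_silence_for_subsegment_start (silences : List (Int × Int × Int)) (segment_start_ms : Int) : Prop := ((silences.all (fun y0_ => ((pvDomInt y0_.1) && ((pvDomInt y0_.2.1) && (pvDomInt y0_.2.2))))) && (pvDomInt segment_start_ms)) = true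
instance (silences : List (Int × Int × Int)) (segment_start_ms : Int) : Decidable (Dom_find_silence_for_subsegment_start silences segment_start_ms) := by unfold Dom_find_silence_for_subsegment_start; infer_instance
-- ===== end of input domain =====

-- B is the same boundary search written as two idiomatic passes (first-match search, then filter+max) instead of one interleaved loop with a running best.


-- ===== PORT A =====
-- loop with early return and running best, transliterated as structural recursion over the list
def pvGoA (segment_start_ms : Int) : List (Int × Int × Int) → Option Int → Option Int
  | [], best => best
  | (s_start, s_end, s_dur) :: rest, best =>
    if s_start ≤ segment_start_ms ∧ segment_start_ms ≤ s_end ∧ 100 ≤ s_dur then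
      if 50 ≤ segment_start_ms - s_start then some segment_start_ms
      else some (max (s_start + 25) (segment_start_ms - 25))
    else if s_end ≤ segment_start_ms ∧ segment_start_ms - s_end ≤ 200 then
      pvGoA segment_start_ms rest
        (match best with
         | none => some s_end
         | some b => if b < s_end then some s_end else some b)
    else pvGoA segment_start_ms rest best

def find_silence_for_subsegment_start (silences : List (Int × Int × Int)) (segment_start_ms : Int) : Option Int :=
  pvGoA segment_start_ms silences none

-- ===== PORT B =====
def find_silence_for_subsegment_start_alt (silences : List (Int × Int × Int)) (segment_start_ms : Int) : Option Int :=
  match silences.find? (fun s => decide (s.1 ≤ segment_start_ms) && decide (segment_start_ms ≤ s.2.1) && decide (100 ≤ s.2.2)) with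
  | some s =>
      if 50 ≤ segment_start_ms - s.1 then some segment_start_ms
      else some (max (s.1 + 25) (segment_start_ms - 25))
  | none =>
      ((silences.filter (fun s => decide (s.2.1 ≤ segment_start_ms) && decide (segment_start_ms - s.2.1 ≤ 200))).map (fun s => s.2.1)).max?

-- ===== PRECONDITION & SPEC =====
def Spec_find_silence_for_subsegment_start (silences : List (Int × Int × Int)) (segment_start_ms : Int) (out : Option Int) : Prop := out = find_silence_for_subsegment_start_alt silences segment_start_ms
instance (silences : List (Int × Int × Int)) (segment_start_ms : Int) (out : Option Int) : Decidable (Spec_find_silence_for_subsegment_start silences segment_start_ms out) := by unfold Spec_find_silence_for_subsegment_start; infer_instance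

-- ===== CLAIM (what is proved, stated in full; the proofs are below) =====
def Claim_equal_find_silence_for_subsegment_start : Prop := ∀ (silences : List (Int × Int × Int)) (segment_start_ms : Int), Dom_find_silence_for_subsegment_start silences segment_start_ms → Spec_find_silence_for_subsegment_start silences segment_start_ms (find_silence_for_subsegment_start silences segment_start_ms)

-- ===== LEMMAS AND PROOFS =====

-- A's running-best update, as a fold step
def pvStep (best : Option Int) (e : Int) : Option Int :=
  match best with
  | none => some e
  | some b => if b < e then some e else some b

lemma pvStep_eq_max (b e : Int) : pvStep (some b) e = some (max b e) := by
  simp only [pvStep]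
  rcases lt_or_ge b e with h | h
  · rw [if_pos h, max_eq_right h.le]
  · rw [if_neg (not_lt.mpr h), max_eq_left h]

lemma foldl_pvStep_some (l : List Int) (a : Int) :
    l.foldl pvStep (some a) = some (l.foldl max a) := by
  induction l generalizing a with
  | nil => rfl
  | cons x xs ih => simp [List.foldl, pvStep_eq_max, ih]

lemma foldl_pvStep_none_eq_max? (l : List Int) :
    l.foldl pvStep none = l.max? := by
  cases l with
  | nil => rfl
  | cons x xs => simp [List.foldl, pvStep, List.max?, foldl_pvStep_some]

lemma pvGoA_eq (t : Int) (l : List (Int × Int × Int)) (best : Option Int) :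
    pvGoA t l best =
      match l.find? (fun s => decide (s.1 ≤ t) && decide (t ≤ s.2.1) && decide (100 ≤ s.2.2)) with
      | some s =>
          if 50 ≤ t - s.1 then some t
          else some (max (s.1 + 25) (t - 25))
      | none =>
          ((l.filter (fun s => decide (s.2.1 ≤ t) && decide (t - s.2.1 ≤ 200))).map (fun s => s.2.1)).foldl pvStep best := by
  induction l generalizing best with
  | nil => rfl
  | cons hd tl ih =>
    obtain ⟨s_start, s_end, s_dur⟩ := hd
    by_cases h1 : s_start ≤ t ∧ t ≤ s_end ∧ 100 ≤ s_dur
    · simp [pvGoA, h1, List.find?]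
    · have hfind : (decide (s_start ≤ t) && decide (t ≤ s_end) && decide (100 ≤ s_dur)) = false := by
        simp only [Bool.and_eq_false_iff, decide_eq_false_iff_not]; tauto
      by_cases h2 : s_end ≤ t ∧ t ≤ 200 + s_end
      · have h2' : s_end ≤ t ∧ t - s_end ≤ 200 := ⟨h2.1, by omega⟩
        simp [pvGoA, h1, h2, h2', List.find?, hfind, List.filter, ih, pvStep]
      · have h2' : ¬ (s_end ≤ t ∧ t - s_end ≤ 200) := by omega
        have hfilt : (decide (s_end ≤ t) && decide (t ≤ 200 + s_end)) = false := by
          simp only [Bool.and_eq_false_iff, decide_eq_false_iff_not]; omega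
        simp [pvGoA, h1, List.find?, hfind, List.filter, hfilt, ih]
        intro ha hb
        exact absurd ⟨ha, hb⟩ h2

-- ===== VERDICT (by name: the statement is the Claim_ definition above) =====
theorem find_silence_for_subsegment_start_spec : Claim_equal_find_silence_for_subsegment_start := by
  intro silences t _
  unfold Spec_find_silence_for_subsegment_start find_silence_for_subsegment_start find_silence_for_subsegment_start_alt
  rw [pvGoA_eq]
  cases h : silences.find? (fun s => decide (s.1 ≤ t) && decide (t ≤ s.2.1) && decide (100 ≤ s.2.2)) with
  | none => simp [foldl_pvStep_none_eq_max?]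
  | some s => rfl
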